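-- pv_equiv track=rewrite | github.com/fioresxcat/unirop | dataset/transforms/token_cls_ops.py | _get_segment_spans
-- ===== SOURCE A (Python) =====
-- def _get_segment_spans(word_ids):
--     segment_spans = []
--     prev_segment = None
--     start_token_index, end_token_index = 1, 0
--     for token_index, segment_index in enumerate(word_ids):
--         if token_index == 0:
--             continue
--         if prev_segment is not None and segment_index != prev_segment:
--             segment_spans.append((start_token_index, end_token_index))
--             start_token_index = token_index
--             end_token_index = token_index
--         else:
--             end_token_index += 1
--         if segment_index is None:
--             break
--         prev_segment = segment_index
--
--     return segment_spans
-- ===== SOURCE B (Python) =====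
-- def _get_segment_spans(word_ids):
--     # Phase 1: split the tokens at index >= 1 into maximal runs of equal
--     # segment values, each recorded as (value, start_index, end_index).
--     n = len(word_ids)
--     runs = []
--     i = 1
--     while i < n:
--         v = word_ids[i]
--         j = i + 1
--         while j < n and word_ids[j] == v:
--             j += 1
--         runs.append((v, i, j - 1))
--         i = j
--     # Phase 2: emit spans; stop at the first None run, and when no None
--     # run occurs drop the final (never-closed) run.
--     spans = []
--     for v, s, e in runs:
--         if v is None:
--             return spans
--         spans.append((s, e))
--     return spans[:-1]
-- ===== Notes on version B (the rewrite author's own statement) =====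
-- stated objective: alternative
-- what changed: A's single pass with a prev/start/end state machine and an in-loop break is replaced by a two-phase decomposition: first compute the maximal runs of equal segment values as (value, start, end) triples, then emit spans from the run list, stopping at the first None run and dropping the final never-closed run.
import Mathlib
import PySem

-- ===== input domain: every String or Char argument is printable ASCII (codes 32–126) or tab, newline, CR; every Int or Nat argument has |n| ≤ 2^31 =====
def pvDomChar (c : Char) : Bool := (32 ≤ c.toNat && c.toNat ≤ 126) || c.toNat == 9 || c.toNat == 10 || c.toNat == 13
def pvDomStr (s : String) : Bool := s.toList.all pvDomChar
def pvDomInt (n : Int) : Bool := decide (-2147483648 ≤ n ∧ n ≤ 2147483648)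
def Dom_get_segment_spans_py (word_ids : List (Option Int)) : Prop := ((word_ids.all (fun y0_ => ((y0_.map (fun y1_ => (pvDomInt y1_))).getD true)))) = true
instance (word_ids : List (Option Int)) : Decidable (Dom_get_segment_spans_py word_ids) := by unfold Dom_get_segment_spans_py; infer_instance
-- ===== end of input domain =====

-- B replaces A's one-pass prev/start/end state machine with break by a two-phase
-- decomposition (compute the runs of equal segment values, then emit spans); objective:
-- alternative — same linear cost, different structure.

-- ===== PORT A =====
-- Literal port of A's loop over enumerate(word_ids); state = (spans, prev, start, end),
-- the `break` is the non-recursive exit, `continue` for token_index == 0 is the first branch.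
def aLoop : List (Int × Option Int) → List (Int × Int) → Option Int → Int → Int → List (Int × Int)
  | [], spans, _prev, _st, _en => spans
  | (ti, si) :: rest, spans, prev, st, en =>
    if ti = 0 then aLoop rest spans prev st en
    else if prev ≠ none ∧ si ≠ prev then
      -- append (start, end), reset the run; then `if segment_index is None: break`
      if si = none then spans ++ [(st, en)]
      else aLoop rest (spans ++ [(st, en)]) si ti ti
    else
      if si = none then spans
      else aLoop rest spans si st (en + 1)

def get_segment_spans_py (word_ids : List (Option Int)) : List (Int × Int) :=
  aLoop (PySem.List.enumerate word_ids) [] none 1 0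

-- ===== PORT B =====
-- inner `while j < n and word_ids[j] == v: j += 1` of Source B (j is a nonnegative
-- in-range index there, so getD is exact for word_ids[j])
def bCount (w : List (Option Int)) (n : Nat) (v : Option Int) (j : Nat) : Nat :=
  if h : j < n ∧ w.getD j none = v then bCount w n v (j + 1) else j
termination_by n - j
decreasing_by omega

-- cited by bRuns' decreasing_by
theorem bCount_ge (w : List (Option Int)) (n : Nat) (v : Option Int) (j : Nat) : j ≤ bCount w n v j := by
  unfold bCount
  split
  · exact le_trans (by omega) (bCount_ge w n v (j + 1))
  · exact le_refl j
termination_by n - j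
decreasing_by omega

-- phase 1 of Source B: outer `while i < n` cursor collecting runs (value, start_index, end_index)
def bRuns (w : List (Option Int)) (n i : Nat) : List (Option Int × Int × Int) :=
  if h : i < n then
    let v := w.getD i none
    let j := bCount w n v (i + 1)
    (v, (i : Int), (j : Int) - 1) :: bRuns w n j
  else []
termination_by n - i
decreasing_by
  have h1 : i + 1 ≤ bCount w n (w.getD i none) (i + 1) := bCount_ge _ _ _ _
  omega

-- phase 2 of Source B: emit spans, return early at the first None run; `spans[:-1]` is dropLast
def bEmit : List (Option Int × Int × Int) → List (Int × Int) → List (Int × Int)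
  | [], spans => spans.dropLast
  | (v, s, e) :: rest, spans =>
    if v = none then spans else bEmit rest (spans ++ [(s, e)])

def get_segment_spans_py_alt (word_ids : List (Option Int)) : List (Int × Int) :=
  bEmit (bRuns word_ids word_ids.length 1) []

-- ===== PRECONDITION & SPEC =====
def Spec_get_segment_spans_py (word_ids : List (Option Int)) (out : List (Int × Int)) : Prop := out = get_segment_spans_py_alt word_ids
instance (word_ids : List (Option Int)) (out : List (Int × Int)) : Decidable (Spec_get_segment_spans_py word_ids out) := by unfold Spec_get_segment_spans_py; infer_instance

-- ===== CLAIM (what is proved, stated in full; the proofs are below) =====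
def Claim_equal_get_segment_spans_py : Prop := ∀ (word_ids : List (Option Int)), Dom_get_segment_spans_py word_ids → Spec_get_segment_spans_py word_ids (get_segment_spans_py word_ids)

-- ===== LEMMAS AND PROOFS =====

-- common characterisation of both programs: the spans still to be emitted when the
-- current run has value p, start st, last index en, and l is the unprocessed rest
def G (p st en : Int) : List (Option Int) → List (Int × Int)
  | [] => []
  | none :: _ => [(st, en)]
  | some u :: l => if u = p then G p st (en + 1) l else (st, en) :: G u (en + 1) (en + 1) l

theorem aLoop_eq_G (l : List (Option Int)) : ∀ (i st : Int) (p : Int) (acc : List (Int × Int)),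
    1 ≤ i → aLoop (PySem.List.enumerate l i) acc (some p) st (i - 1) = acc ++ G p st (i - 1) l := by
  induction l with
  | nil => intro i st p acc hi; simp [PySem.List.enumerate, aLoop, G]
  | cons x t ih =>
    intro i st p acc hi
    rw [PySem.List.enumerate_cons]
    match x with
    | none =>
        simp [aLoop, G, show ¬ (i = 0) by omega]
    | some u =>
        by_cases hu : u = p
        · subst hu
          simp only [aLoop, G, show ¬ (i = 0) by omega, if_pos]
          have := ih (i + 1) st u acc (by omega)
          simp only [show i + 1 - 1 = i from by omega] at this
          simp [show i - 1 + 1 = i from by omega, this]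
        · simp only [aLoop, G, show ¬ (i = 0) by omega]
          have h2 : (some p : Option Int) ≠ none ∧ (some u : Option Int) ≠ some p := by simp [hu]
          rw [if_pos h2, if_neg (by simp), if_neg hu]
          have := ih (i + 1) i u (acc ++ [(st, i - 1)]) (by omega)
          simp only [show i + 1 - 1 = i from by omega] at this
          simp [this, show i - 1 + 1 = i from by omega]

theorem A_eq_match (w : List (Option Int)) :
    get_segment_spans_py w =
      match w.drop 1 with
      | [] => []
      | none :: _ => []
      | some v :: t => G v 1 1 t := by
  match w with
  | [] => simp [get_segment_spans_py, PySem.List.enumerate, aLoop]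
  | x :: t =>
    rw [get_segment_spans_py, PySem.List.enumerate_cons]
    match t with
    | [] => simp [PySem.List.enumerate, aLoop]
    | none :: t' => simp [PySem.List.enumerate_cons, aLoop]
    | some v :: t' =>
        simp only [PySem.List.enumerate_cons, aLoop]
        norm_num
        have := aLoop_eq_G t' 2 1 v []
        norm_num at this
        simp [this]

theorem bCount_eq (w : List (Option Int)) (v : Option Int) (j : Nat) :
    bCount w w.length v j = j + ((w.drop j).takeWhile (fun x => x == v)).length := by
  unfold bCount
  split
  · rename_i h
    obtain ⟨hk, hv⟩ := h
    rw [bCount_eq w v (j + 1)]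
    rw [List.drop_eq_getElem_cons hk]
    have : w[j] = v := by rw [← hv]; simp [List.getD_eq_getElem?_getD, List.getElem?_eq_getElem hk]
    simp [this]
    omega
  · rename_i h
    by_cases hk : j < w.length
    · have hv : ¬ w.getD j none = v := fun hv => h ⟨hk, hv⟩
      rw [List.drop_eq_getElem_cons hk]
      have : ¬ (w[j] == v) = true := by
        simp only [beq_iff_eq]
        intro he; exact hv (by rw [List.getD_eq_getElem?_getD, List.getElem?_eq_getElem hk]; simpa using he)
      simp [this]
    · rw [List.drop_eq_nil_of_le (by omega)]; simp
termination_by w.length - j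
decreasing_by omega

theorem G_run (t : List (Option Int)) : ∀ (v st en : Int),
    G v st en t = G v st (en + ((t.takeWhile (fun x => x == some v)).length : Int))
      (t.dropWhile (fun x => x == some v)) := by
  induction t with
  | nil => intro v st en; simp
  | cons x t ih =>
    intro v st en
    by_cases hx : x = some v
    · subst hx
      simp only [List.takeWhile_cons, List.dropWhile_cons, beq_self_eq_true, if_true,
        G, List.length_cons]
      rw [ih]
      have h3 : ∀ (X Y : Int) (l : List (Option Int)), X = Y → G v st X l = G v st Y l := by
        intro X Y l h; rw [h]
      apply h3; push_cast; ring
    · have hb : ¬ ((x == some v) = true) := by simpa using hx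
      rw [List.takeWhile_cons, List.dropWhile_cons]
      simp [hb]

theorem drop_len_takeWhile (l : List (Option Int)) (p : Option Int → Bool) :
    l.drop (l.takeWhile p).length = l.dropWhile p := by
  induction l with
  | nil => simp
  | cons x t ih =>
    by_cases h : p x
    · simp [h, ih]
    · simp [h]

theorem getD_of_drop (w : List (Option Int)) (j : Nat) (y : Option Int) (r : List (Option Int))
    (h : w.drop j = y :: r) : j < w.length ∧ w.getD j none = y ∧ w.drop (j + 1) = r := by
  have hj : j < w.length := by
    by_contra hc
    rw [List.drop_eq_nil_of_le (by omega)] at h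
    simp at h
  rw [List.drop_eq_getElem_cons hj] at h
  refine ⟨hj, ?_, ?_⟩
  · rw [List.getD_eq_getElem?_getD, List.getElem?_eq_getElem hj]
    simpa using (List.cons.inj h).1
  · exact (List.cons.inj h).2

theorem B_eq_G (w : List (Option Int)) (k : Nat) : ∀ (i : Nat), w.length - i ≤ k →
    ∀ (v : Int) (acc : List (Int × Int)), i < w.length → w.getD i none = some v →
    bEmit (bRuns w w.length i) acc = acc ++ G v (i : Int) (i : Int) (w.drop (i + 1)) := by
  induction k with
  | zero => intro i hk v acc hi _; omega
  | succ k ih =>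
    intro i hk v acc hi hv
    set t := w.drop (i + 1) with htdef
    set m := (t.takeWhile (fun x => x == some v)).length with hm
    have hkc : bCount w w.length (some v) (i + 1)
        = i + 1 + m := by rw [bCount_eq]
    have hdropj : w.drop (i + 1 + m) = t.dropWhile (fun x => x == some v) := by
      have hdd : w.drop (i + 1 + m) = t.drop m := by
        rw [htdef, List.drop_drop]
      rw [hdd, hm]
      exact drop_len_takeWhile t (fun x => x == some v)
    rw [bRuns, dif_pos hi]
    simp only [hv, hkc]
    have hspan : ((i + 1 + m : Nat) : Int) - 1 = (i : Int) + (m : Int) := by push_cast; ring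
    rw [hspan]
    rw [G_run t v (i : Int) (i : Int), ← hm]
    cases hr : t.dropWhile (fun x => x == some v) with
    | nil =>
      have : w.length ≤ i + 1 + m := by
        by_contra hc
        rw [List.drop_eq_getElem_cons (by omega : i + 1 + m < w.length)] at hdropj
        rw [hr] at hdropj
        simp at hdropj
        omega
      rw [bRuns, dif_neg (by omega)]
      simp [bEmit, G]
    | cons y r2 =>
      have hy : ¬ ((y == some v) = true) := by
        have := List.head?_dropWhile_not (fun x => x == some v) t
        rw [hr] at this; simpa using this
      rw [hr] at hdropj
      obtain ⟨hjlt, hjget, hjdrop⟩ := getD_of_drop w (i + 1 + m) y r2 hdropj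
      cases y with
      | none =>
        rw [bEmit, if_neg (by simp)]
        rw [bRuns, dif_pos hjlt, hjget]
        simp [bEmit, G]
      | some u =>
        have hu : u ≠ v := by simpa using hy
        rw [bEmit, if_neg (by simp)]
        have hlen : (some u :: r2).length ≤ t.length := by
          rw [← hr]; exact List.length_dropWhile_le _ _
        have htlen : t.length = w.length - (i + 1) := by rw [htdef]; simp
        rw [ih (i + 1 + m) (by simp at hlen; omega) u (acc ++ [((i : Int), (i : Int) + (m : Int))]) hjlt hjget]
        rw [hjdrop]
        rw [G, if_neg hu]
        have e1 : ((i + 1 + m : Nat) : Int) = (i : Int) + (m : Int) + 1 := by push_cast; ring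
        simp only [e1]
        simp

theorem B_eq_match (w : List (Option Int)) :
    get_segment_spans_py_alt w =
      match w.drop 1 with
      | [] => []
      | none :: _ => []
      | some v :: t => G v 1 1 t := by
  rw [get_segment_spans_py_alt]
  cases hd : w.drop 1 with
  | nil =>
    have : w.length ≤ 1 := by
      by_contra hc
      rw [List.drop_eq_getElem_cons (by omega : 1 < w.length)] at hd
      exact (List.cons_ne_nil _ _) hd
    rw [bRuns, dif_neg (by omega)]
    simp [bEmit]
  | cons y t =>
    obtain ⟨h1, hget, hdrop⟩ := getD_of_drop w 1 y t hd
    cases y with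
    | none =>
      rw [bRuns, dif_pos h1, hget]
      simp [bEmit]
    | some v =>
      have := B_eq_G w (w.length - 1) 1 (by omega) v [] h1 hget
      rw [hdrop] at this
      simpa using this

-- ===== VERDICT (by name: the statement is the Claim_ definition above) =====
theorem get_segment_spans_py_spec : Claim_equal_get_segment_spans_py := by
  intro w _
  unfold Spec_get_segment_spans_py
  rw [A_eq_match, B_eq_match]
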